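-- pv_equiv track=rewrite | github.com/hookprobe/hookprobe | products/fortress/lib/hostname_decoder.py | decode_dnsmasq_hostname
-- ===== SOURCE A (Python) =====
-- from typing import Optional
--
-- def decode_dnsmasq_hostname(hostname: Optional[str]) -> Optional[str]:
--     """
--     Decode octal escapes in dnsmasq hostnames.
--
--     dnsmasq uses octal escape sequences (\\DDD) for special characters,
--     including spaces (\\032) and UTF-8 multi-byte sequences.
--
--     Args:
--         hostname: Raw hostname from DHCP (may contain \\DDD octal escapes)
--
--     Returns:
--         Decoded hostname, or original if no escapes found, or None if input is None
--     """
--     if not hostname: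
--         return hostname
--
--     # Quick check - if no backslash, return as-is
--     if '\\' not in hostname:
--         return hostname
--
--     try:
--         # Replace octal escapes with actual bytes
--         result = b''
--         i = 0
--
--         while i < len(hostname):
--             if hostname[i] == '\\' and i + 3 < len(hostname):
--                 octal_str = hostname[i+1:i+4]
--
--                 # Check if all 3 chars are octal digits (0-7)
--                 if all(c in '01234567' for c in octal_str):
--                     byte_value = int(octal_str, 8)
--                     result += bytes([byte_value])
--                     i += 4
--                     continue
--
--             # Regular character - encode to UTF-8 bytes
--             result += hostname[i].encode('utf-8', errors='replace')
--             i += 1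
--
--         # Decode UTF-8 bytes back to string
--         decoded = result.decode('utf-8', errors='replace').strip()
--         return decoded if decoded else hostname
--
--     except Exception:
--         # Fallback to original hostname on any error
--         return hostname
-- ===== SOURCE B (Python) =====
-- from typing import Optional
--
-- def decode_dnsmasq_hostname(hostname: Optional[str]) -> Optional[str]:
--     """Split on backslashes once, then fold over the segments, decoding each
--     segment's leading 3-octal-digit escape; avoids the index-by-index scan and
--     the repeated bytes concatenation of the original."""
--     if not hostname:
--         return hostname
--
--     if '\\' not in hostname:
--         return hostname
--
--     segments = hostname.split('\\')
--     try:
--         buf = bytearray(segments[0].encode('utf-8', errors='replace'))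
--         for seg in segments[1:]:
--             head = seg[:3]
--             if len(head) == 3 and all(c in '01234567' for c in head):
--                 buf += bytes([int(head, 8)])
--                 buf += seg[3:].encode('utf-8', errors='replace')
--             else:
--                 buf += b'\\'
--                 buf += seg.encode('utf-8', errors='replace')
--         decoded = bytes(buf).decode('utf-8', errors='replace').strip()
--         return decoded if decoded else hostname
--     except ValueError:
--         return hostname
-- ===== Notes on version B (the rewrite author's own statement) =====
-- stated objective: alternative
-- what changed: Replaces A's index-by-index while-loop that re-tests each position for a backslash with one split on backslashes plus a fold over the segments that decodes each segment's leading 3-octal-digit escape; the Lean port also decodes UTF-8 via a byte-at-a-time state machine instead of A's multi-byte pattern matcher.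
import Mathlib
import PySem

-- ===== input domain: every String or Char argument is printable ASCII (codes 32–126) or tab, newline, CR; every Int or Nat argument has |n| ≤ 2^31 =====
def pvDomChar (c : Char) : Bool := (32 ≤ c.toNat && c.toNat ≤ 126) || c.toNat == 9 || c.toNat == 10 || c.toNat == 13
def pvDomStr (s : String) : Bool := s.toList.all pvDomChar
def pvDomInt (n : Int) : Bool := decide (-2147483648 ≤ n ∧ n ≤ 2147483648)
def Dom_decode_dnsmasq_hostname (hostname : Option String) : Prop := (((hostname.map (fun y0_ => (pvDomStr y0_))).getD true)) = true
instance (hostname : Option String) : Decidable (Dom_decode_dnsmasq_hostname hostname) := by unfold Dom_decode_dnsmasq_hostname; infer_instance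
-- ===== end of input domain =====

-- B replaces A's index-by-index scanner (which re-tests each position for a backslash and
-- grows an immutable bytes object) by one split on backslashes followed by a fold over the
-- segments, and its port decodes UTF-8 with a one-byte-at-a-time state machine instead of
-- A's multi-byte pattern matcher (alternative decomposition; return value proved equal).

-- ===== SHARED SMALL HELPERS (both Pythons use the same literals / library calls) =====

-- `c in '01234567'`
def pvOct (c : Char) : Bool := 48 ≤ c.toNat && c.toNat ≤ 55

-- `int(<3 octal digits>, 8)`
def pvOctVal3 (a b c : Char) : Nat :=
  64 * (a.toNat - 48) + 8 * (b.toNat - 48) + (c.toNat - 48)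

-- `ch.encode('utf-8', errors='replace')` for one character (bytes as Nat 0..255)
def pvEncChar (c : Char) : List Nat :=
  let n := c.toNat
  if n < 128 then [n]
  else if n < 2048 then [192 + n / 64, 128 + n % 64]
  else if n < 65536 then [224 + n / 4096, 128 + (n / 64) % 64, 128 + n % 64]
  else [240 + n / 262144, 128 + (n / 4096) % 64, 128 + (n / 64) % 64, 128 + n % 64]

-- `s.encode('utf-8', errors='replace')` for a string
def pvEncRun (cs : List Char) : List Nat := cs.flatMap pvEncChar

-- str.strip() (Python's whitespace set, restricted to reachable codepoints)
def pvIsSpace (c : Char) : Bool :=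
  [9, 10, 11, 12, 13, 28, 29, 30, 31, 32, 0x85, 0xA0, 0x1680,
   0x2000, 0x2001, 0x2002, 0x2003, 0x2004, 0x2005, 0x2006, 0x2007, 0x2008, 0x2009, 0x200A,
   0x2028, 0x2029, 0x202F, 0x205F, 0x3000].contains c.toNat

def pvStrip (cs : List Char) : List Char :=
  ((cs.dropWhile pvIsSpace).reverse.dropWhile pvIsSpace).reverse

-- ===== PORT A =====

def pvCont (b : Nat) : Bool := 128 ≤ b && b ≤ 191

-- A's call of `bytes.decode('utf-8', errors='replace')` (CPython replaces each maximal
-- subpart of an ill-formed sequence by U+FFFD), ported as a multi-byte pattern matcher;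
-- checked differentially against CPython
def pvDecodeReplace : List Nat → List Char
  | [] => []
  | b :: rest =>
    if b < 128 then Char.ofNat b :: pvDecodeReplace rest
    else if 194 ≤ b && b ≤ 223 then
      match rest with
      | b1 :: r1 =>
        if pvCont b1 then Char.ofNat ((b - 192) * 64 + (b1 - 128)) :: pvDecodeReplace r1
        else '\uFFFD' :: pvDecodeReplace (b1 :: r1)
      | [] => ['\uFFFD']
    else if 224 ≤ b && b ≤ 239 then
      match rest with
      | b1 :: r1 =>
        if ((if b = 224 then 160 else 128) ≤ b1 && b1 ≤ (if b = 237 then 159 else 191) : Bool) then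
          match r1 with
          | b2 :: r2 =>
            if pvCont b2 then
              Char.ofNat ((b - 224) * 4096 + (b1 - 128) * 64 + (b2 - 128)) :: pvDecodeReplace r2
            else '\uFFFD' :: pvDecodeReplace (b2 :: r2)
          | [] => ['\uFFFD']
        else '\uFFFD' :: pvDecodeReplace (b1 :: r1)
      | [] => ['\uFFFD']
    else if 240 ≤ b && b ≤ 244 then
      match rest with
      | b1 :: r1 =>
        if ((if b = 240 then 144 else 128) ≤ b1 && b1 ≤ (if b = 244 then 143 else 191) : Bool) then
          match r1 with
          | b2 :: r2 =>
            if pvCont b2 then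
              match r2 with
              | b3 :: r3 =>
                if pvCont b3 then
                  Char.ofNat ((b - 240) * 262144 + (b1 - 128) * 4096 + (b2 - 128) * 64 + (b3 - 128))
                    :: pvDecodeReplace r3
                else '\uFFFD' :: pvDecodeReplace (b3 :: r3)
              | [] => ['\uFFFD']
            else '\uFFFD' :: pvDecodeReplace (b2 :: r2)
          | [] => ['\uFFFD']
        else '\uFFFD' :: pvDecodeReplace (b1 :: r1)
      | [] => ['\uFFFD']
    else '\uFFFD' :: pvDecodeReplace rest
termination_by l => l.length
decreasing_by all_goals ((try subst_vars); simp; try omega)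

-- A's while-loop: builds the byte string left to right; none = the ValueError of
-- bytes([v]) for v > 255
def pvScanA : List Char → Option (List Nat)
  | [] => some []
  | x :: rest =>
    if x = '\\' then
      match hr : rest with
      | a :: b :: c :: rest' =>
        if pvOct a && pvOct b && pvOct c then
          if 255 < pvOctVal3 a b c then none
          else (pvScanA rest').map (fun bs => pvOctVal3 a b c :: bs)
        else (pvScanA (a :: b :: c :: rest')).map (fun bs => pvEncChar x ++ bs)
      | _ => (pvScanA rest).map (fun bs => pvEncChar x ++ bs)
    else (pvScanA rest).map (fun bs => pvEncChar x ++ bs)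
termination_by l => l.length
decreasing_by all_goals ((try rw [hr]); (try simp); (try omega))

def decode_dnsmasq_hostname (hostname : Option String) : Option String :=
  match hostname with
  | none => none
  | some h =>
    if h = "" then some h
    else if h.toList.contains '\\' then
      match pvScanA h.toList with
      | none => some h
      | some bs =>
        let d := pvStrip (pvDecodeReplace bs)
        if d = [] then some h else some (String.mk d)
    else some h

-- ===== PORT B =====

-- hostname.split('\\'): first segment and the remaining segments
def pvSplitBS : List Char → List Char × List (List Char)
  | [] => ([], [])
  | c :: rest =>
    if c = '\\' then ([], (pvSplitBS rest).1 :: (pvSplitBS rest).2)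
    else (c :: (pvSplitBS rest).1, (pvSplitBS rest).2)

-- `len(head) == 3 and all(c in '01234567' for c in head)` for head = seg[:3]
def pvIsEsc : List Char → Bool
  | a :: b :: c :: _ => pvOct a && pvOct b && pvOct c
  | _ => false

def pvSegVal : List Char → Nat
  | a :: b :: c :: _ => pvOctVal3 a b c
  | _ => 0

-- one iteration of B's for-loop over segments[1:] (none = the caught ValueError)
def pvSegStep (acc : Option (List Nat)) (seg : List Char) : Option (List Nat) :=
  match acc with
  | none => none
  | some buf =>
    if pvIsEsc seg then
      if 255 < pvSegVal seg then none
      else some (buf ++ pvSegVal seg :: pvEncRun (seg.drop 3))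
    else some (buf ++ pvEncChar '\\' ++ pvEncRun seg)

-- B's call of `bytes.decode('utf-8', errors='replace')`, ported as a byte-at-a-time state
-- machine (need = continuation bytes still expected, cp = accumulated codepoint, lo/hi =
-- admissible range of the next byte); checked differentially against CPython
mutual
def pvDecSM (need cp lo hi : Nat) (l : List Nat) : List Char :=
  match l with
  | [] => if need = 0 then [] else ['\uFFFD']
  | b :: r =>
    if need = 0 then pvDecStart b r
    else if lo ≤ b && b ≤ hi then
      if need = 1 then Char.ofNat (cp * 64 + (b - 128)) :: pvDecSM 0 0 0 0 r
      else pvDecSM (need - 1) (cp * 64 + (b - 128)) 128 191 r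
    else '\uFFFD' :: pvDecStart b r
termination_by 2 * l.length
decreasing_by all_goals (simp; try omega)

def pvDecStart (b : Nat) (r : List Nat) : List Char :=
  if b < 128 then Char.ofNat b :: pvDecSM 0 0 0 0 r
  else if 194 ≤ b && b ≤ 223 then pvDecSM 1 (b - 192) 128 191 r
  else if 224 ≤ b && b ≤ 239 then
    pvDecSM 2 (b - 224) (if b = 224 then 160 else 128) (if b = 237 then 159 else 191) r
  else if 240 ≤ b && b ≤ 244 then
    pvDecSM 3 (b - 240) (if b = 240 then 144 else 128) (if b = 244 then 143 else 191) r
  else '\uFFFD' :: pvDecSM 0 0 0 0 r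
termination_by 2 * r.length + 1
decreasing_by all_goals (simp; try omega)
end

def decode_dnsmasq_hostname_alt (hostname : Option String) : Option String :=
  match hostname with
  | none => none
  | some h =>
    if h = "" then some h
    else if h.toList.contains '\\' then
      let p := pvSplitBS h.toList
      match p.2.foldl pvSegStep (some (pvEncRun p.1)) with
      | none => some h
      | some bs =>
        let d := pvStrip (pvDecSM 0 0 0 0 bs)
        if d = [] then some h else some (String.mk d)
    else some h

-- ===== PRECONDITION & SPEC =====
def Spec_decode_dnsmasq_hostname (hostname : Option String) (out : Option String) : Prop := out = decode_dnsmasq_hostname_alt hostname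
instance (hostname : Option String) (out : Option String) : Decidable (Spec_decode_dnsmasq_hostname hostname out) := by unfold Spec_decode_dnsmasq_hostname; infer_instance

-- ===== CLAIM (what is proved, stated in full; the proofs are below) =====
def Claim_equal_decode_dnsmasq_hostname : Prop := ∀ (hostname : Option String), Dom_decode_dnsmasq_hostname hostname → Spec_decode_dnsmasq_hostname hostname (decode_dnsmasq_hostname hostname)

-- ===== LEMMAS AND PROOFS =====

-- proof-only intermediate: B's fold written as a structural recursion producing the suffix
def pvSegs : List (List Char) → Option (List Nat)
  | [] => some []
  | seg :: rest =>
    if pvIsEsc seg then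
      if 255 < pvSegVal seg then none
      else (pvSegs rest).map (fun bs => pvSegVal seg :: (pvEncRun (seg.drop 3) ++ bs))
    else (pvSegs rest).map (fun bs => pvEncChar '\\' ++ (pvEncRun seg ++ bs))

theorem segStep_none (segs : List (List Char)) : segs.foldl pvSegStep none = none := by
  induction segs with
  | nil => rfl
  | cons s r ih => simpa [pvSegStep] using ih

theorem foldl_eq_segs (segs : List (List Char)) (buf : List Nat) :
    segs.foldl pvSegStep (some buf) = (pvSegs segs).map (fun bs => buf ++ bs) := by
  induction segs generalizing buf with
  | nil => simp [pvSegs]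
  | cons seg rest ih =>
    by_cases he : pvIsEsc seg
    · by_cases hv : 255 < pvSegVal seg
      · simp [pvSegStep, pvSegs, he, hv, segStep_none]
      · simp [pvSegStep, pvSegs, he, hv, ih, Option.map_map]
        congr 1
    · simp [pvSegStep, pvSegs, he, ih, Option.map_map]
      congr 1

theorem oct_ne_bs {c : Char} (h : pvOct c = true) : c ≠ '\\' := by
  intro he; subst he; simp [pvOct] at h

theorem octBS : pvOct '\\' = false := by decide

theorem isEsc_splitBS (l : List Char) : pvIsEsc (pvSplitBS l).1 = pvIsEsc l := by
  rcases l with _ | ⟨a, _ | ⟨b, _ | ⟨c, r⟩⟩⟩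
  · simp [pvSplitBS, pvIsEsc]
  · by_cases ha : a = '\\' <;> simp [pvSplitBS, pvIsEsc, ha]
  · by_cases ha : a = '\\' <;> by_cases hb : b = '\\' <;>
      simp [pvSplitBS, pvIsEsc, ha, hb]
  · by_cases ha : a = '\\'
    · subst ha; simp [pvSplitBS, pvIsEsc, octBS]
    · by_cases hb : b = '\\'
      · subst hb; simp [pvSplitBS, pvIsEsc, ha, octBS]
      · by_cases hc : c = '\\'
        · subst hc; simp [pvSplitBS, pvIsEsc, ha, hb, octBS]
        · simp [pvSplitBS, pvIsEsc, ha, hb, hc]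

theorem splitBS_bs (t : List Char) :
    pvSplitBS ('\\' :: t) = ([], (pvSplitBS t).1 :: (pvSplitBS t).2) := by
  simp [pvSplitBS]

theorem splitBS_cons {c : Char} (h : ¬ c = '\\') (t : List Char) :
    pvSplitBS (c :: t) = (c :: (pvSplitBS t).1, (pvSplitBS t).2) := by
  simp [pvSplitBS, h]

theorem scanA_eq_segs (l : List Char) :
    pvScanA l = (pvSegs (pvSplitBS l).2).map (fun bs => pvEncRun (pvSplitBS l).1 ++ bs) := by
  induction l using pvScanA.induct with
  | case1 => simp [pvScanA, pvSplitBS, pvSegs, pvEncRun]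
  | case2 a b c rest' hoct hv =>
    have ha := oct_ne_bs (show pvOct a = true by simp_all)
    have hb := oct_ne_bs (show pvOct b = true by simp_all)
    have hc := oct_ne_bs (show pvOct c = true by simp_all)
    simp [pvScanA, splitBS_bs, splitBS_cons ha, splitBS_cons hb, splitBS_cons hc,
      pvSegs, pvIsEsc, pvSegVal, hoct, hv]
  | case3 a b c rest' hoct hv ih =>
    have ha := oct_ne_bs (show pvOct a = true by simp_all)
    have hb := oct_ne_bs (show pvOct b = true by simp_all)
    have hc := oct_ne_bs (show pvOct c = true by simp_all)
    simp [pvScanA, splitBS_bs, splitBS_cons ha, splitBS_cons hb, splitBS_cons hc,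
      pvSegs, pvIsEsc, pvSegVal, hoct, hv, ih, Option.map_map, pvEncRun]
    try rfl
    try (congr 1; funext bs; simp [List.append_assoc])
  | case4 a b c rest' hoct ih =>
    have hfalse : pvIsEsc (pvSplitBS (a :: b :: c :: rest')).1 = false := by
      rw [isEsc_splitBS]; simpa [pvIsEsc] using hoct
    simp [pvScanA, hoct, splitBS_bs, pvSegs, hfalse, ih, Option.map_map, pvEncRun,
      List.append_assoc]
    try rfl
    try (congr 1; funext bs; simp [List.append_assoc])
  | case5 rest hnomatch ih =>
    have hfalse : pvIsEsc (pvSplitBS rest).1 = false := by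
      rw [isEsc_splitBS]
      rcases rest with _ | ⟨a, _ | ⟨b, _ | ⟨c, r⟩⟩⟩ <;> first
        | exact absurd rfl (hnomatch a b c r)
        | simp [pvIsEsc]
    rcases rest with _ | ⟨a, _ | ⟨b, _ | ⟨c, r⟩⟩⟩
    · simp [pvScanA, splitBS_bs, pvSegs, pvIsEsc, pvSegVal, hfalse, pvEncRun, ih, pvSplitBS]
      try rfl
      try (congr 1; funext bs; simp [List.append_assoc])
    · simp [pvScanA, splitBS_bs, pvSegs, hfalse, pvEncRun, ih, Option.map_map,
        List.append_assoc]
      try rfl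
      try (congr 1; funext bs; simp [List.append_assoc])
    · simp [pvScanA, splitBS_bs, pvSegs, hfalse, pvEncRun, ih, Option.map_map,
        List.append_assoc]
      try rfl
      try (congr 1; funext bs; simp [List.append_assoc])
    · exact absurd rfl (hnomatch a b c r)
  | case6 x rest hx ih =>
    rw [pvScanA.eq_def]
    simp [hx, splitBS_cons hx, pvSegs, ih, Option.map_map, pvEncRun,
      List.append_assoc]
    try rfl
    try (congr 1; funext bs; simp [List.append_assoc])

theorem decSM_start (b : Nat) (r : List Nat) :
    pvDecSM 0 0 0 0 (b :: r) = pvDecStart b r := by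
  rw [pvDecSM]; simp

theorem decSM_cons {need : Nat} (cp lo hi b : Nat) (r : List Nat) (h : ¬ need = 0) :
    pvDecSM need cp lo hi (b :: r) =
      if lo ≤ b && b ≤ hi then
        (if need = 1 then Char.ofNat (cp * 64 + (b - 128)) :: pvDecSM 0 0 0 0 r
         else pvDecSM (need - 1) (cp * 64 + (b - 128)) 128 191 r)
      else '\uFFFD' :: pvDecStart b r := by
  rw [pvDecSM]; simp [h]

theorem decSM_eq_aux : ∀ (n : Nat) (bs : List Nat), bs.length ≤ n →
    pvDecSM 0 0 0 0 bs = pvDecodeReplace bs := by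
  intro n
  induction n with
  | zero =>
    intro bs hlen
    rcases bs with _ | ⟨b, r⟩
    · rw [pvDecSM, pvDecodeReplace.eq_def]; rfl
    · simp at hlen
  | succ n ih =>
    intro bs hlen
    rcases bs with _ | ⟨b, rest⟩
    · rw [pvDecSM, pvDecodeReplace.eq_def]; rfl
    · have hr : rest.length ≤ n := by simp at hlen; omega
      rw [decSM_start, pvDecStart, pvDecodeReplace.eq_def]
      by_cases h1 : b < 128
      · simp [h1, ih rest hr]
      · by_cases h2 : (194 ≤ b && b ≤ 223) = true
        · rcases rest with _ | ⟨b1, r1⟩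
          · simp [h1, h2, pvDecSM]
          · have hr1 : r1.length ≤ n := by simp at hlen; omega
            rw [decSM_cons _ _ _ _ _ (by omega : ¬ (1:Nat) = 0)]
            by_cases hc1 : (128 ≤ b1 && b1 ≤ 191) = true
            · simp [h1, h2, pvCont, hc1, ih r1 hr1]
            · have hrec := ih (b1 :: r1) (by simp at hlen ⊢; omega)
              rw [decSM_start] at hrec
              simp [h1, h2, pvCont, hc1, hrec]
        · by_cases h3 : (224 ≤ b && b ≤ 239) = true
          · rcases rest with _ | ⟨b1, r1⟩
            · simp [h1, h2, h3, pvDecSM]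
            · rw [decSM_cons _ _ _ _ _ (by omega : ¬ (2:Nat) = 0)]
              by_cases hc1 : ((if b = 224 then 160 else 128) ≤ b1 &&
                  b1 ≤ (if b = 237 then 159 else 191)) = true
              · rcases r1 with _ | ⟨b2, r2⟩
                · simp [h1, h2, h3, hc1, pvDecSM]
                · rw [decSM_cons _ _ _ _ _ (by omega : ¬ (1:Nat) = 0)]
                  by_cases hc2 : (128 ≤ b2 && b2 ≤ 191) = true
                  · have he : ((b - 224) * 64 + (b1 - 128)) * 64 + (b2 - 128)
                        = (b - 224) * 4096 + (b1 - 128) * 64 + (b2 - 128) := by ring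
                    simp [h1, h2, h3, hc1, pvCont, hc2, he,
                      ih r2 (by simp at hlen ⊢; omega)]
                    rw [decSM_cons _ _ _ _ _ (by omega : ¬ (1:Nat) = 0)]
                    simp [pvCont, hc2, he, ih r2 (by simp at hlen ⊢; omega)]
                  · have hrec := ih (b2 :: r2) (by simp at hlen ⊢; omega)
                    rw [decSM_start] at hrec
                    simp [h1, h2, h3, hc1, pvCont, hc2, hrec]
                    rw [decSM_cons _ _ _ _ _ (by omega : ¬ (1:Nat) = 0)]
                    simp [pvCont, hc2, hrec]
              · have hrec := ih (b1 :: r1) (by simp at hlen ⊢; omega)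
                rw [decSM_start] at hrec
                simp [h1, h2, h3, hc1, hrec]
          · by_cases h4 : (240 ≤ b && b ≤ 244) = true
            · rcases rest with _ | ⟨b1, r1⟩
              · simp [h1, h2, h3, h4, pvDecSM]
              · rw [decSM_cons _ _ _ _ _ (by omega : ¬ (3:Nat) = 0)]
                by_cases hc1 : ((if b = 240 then 144 else 128) ≤ b1 &&
                    b1 ≤ (if b = 244 then 143 else 191)) = true
                · rcases r1 with _ | ⟨b2, r2⟩
                  · simp [h1, h2, h3, h4, hc1, pvDecSM]
                  · rw [decSM_cons _ _ _ _ _ (by omega : ¬ (2:Nat) = 0)]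
                    by_cases hc2 : (128 ≤ b2 && b2 ≤ 191) = true
                    · rcases r2 with _ | ⟨b3, r3⟩
                      · simp [h1, h2, h3, h4, hc1, pvCont, hc2, pvDecSM]
                      · rw [decSM_cons _ _ _ _ _ (by omega : ¬ (1:Nat) = 0)]
                        by_cases hc3 : (128 ≤ b3 && b3 ≤ 191) = true
                        · have he : (((b - 240) * 64 + (b1 - 128)) * 64 + (b2 - 128)) * 64
                              + (b3 - 128)
                              = (b - 240) * 262144 + (b1 - 128) * 4096 + (b2 - 128) * 64
                              + (b3 - 128) := by ring
                          simp [h1, h2, h3, h4, hc1, pvCont, hc2, hc3, he,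
                            ih r3 (by simp at hlen ⊢; omega)]
                          rw [decSM_cons _ _ _ _ _ (by omega : ¬ (2:Nat) = 0)]
                          simp [pvCont, hc2]
                          rw [decSM_cons _ _ _ _ _ (by omega : ¬ (1:Nat) = 0)]
                          simp [pvCont, hc3, he, ih r3 (by simp at hlen ⊢; omega)]
                        · have hrec := ih (b3 :: r3) (by simp at hlen ⊢; omega)
                          rw [decSM_start] at hrec
                          simp [h1, h2, h3, h4, hc1, pvCont, hc2, hc3, hrec]
                          rw [decSM_cons _ _ _ _ _ (by omega : ¬ (2:Nat) = 0)]
                          simp [pvCont, hc2]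
                          rw [decSM_cons _ _ _ _ _ (by omega : ¬ (1:Nat) = 0)]
                          simp [pvCont, hc3, hrec]
                    · have hrec := ih (b2 :: r2) (by simp at hlen ⊢; omega)
                      rw [decSM_start] at hrec
                      simp [h1, h2, h3, h4, hc1, pvCont, hc2, hrec]
                      rw [decSM_cons _ _ _ _ _ (by omega : ¬ (2:Nat) = 0)]
                      simp [pvCont, hc2, hrec]
                · have hrec := ih (b1 :: r1) (by simp at hlen ⊢; omega)
                  rw [decSM_start] at hrec
                  simp [h1, h2, h3, h4, hc1, hrec]
            · simp [h1, h2, h3, h4, ih rest hr]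

theorem decSM_eq (bs : List Nat) : pvDecSM 0 0 0 0 bs = pvDecodeReplace bs :=
  decSM_eq_aux bs.length bs (Nat.le_refl _)

-- ===== VERDICT (by name: the statement is the Claim_ definition above) =====
theorem decode_dnsmasq_hostname_spec : Claim_equal_decode_dnsmasq_hostname := by
  intro hostname _
  unfold Spec_decode_dnsmasq_hostname
  cases hostname with
  | none => rfl
  | some h =>
    simp only [decode_dnsmasq_hostname, decode_dnsmasq_hostname_alt, scanA_eq_segs,
      foldl_eq_segs, decSM_eq]
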